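-- pv_equiv track=rewrite | github.com/Imageomics/bioclip-image-search-lite | app.py | _generate_tree_summary
-- ===== SOURCE A (Python) =====
-- from collections import defaultdict
-- from typing import Dict, List, Optional, Tuple
--
-- def _generate_tree_summary(metadata_list: List[Dict]) -> str:
--     if not metadata_list:
--         return "No results to summarize."
--
--     # Build nested tree: kingdom > phylum > class > order > family > genus > species
--     RANKS = ("kingdom", "phylum", "class", "order", "family", "genus", "species")
--
--     def _nested():
--         return defaultdict(_nested)
--
--     root = _nested()
--     for m in metadata_list:
--         node = root
--         for r in RANKS:
--             node = node[m.get(r) or "Unknown"]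
--
--     def _count(node) -> int:
--         if not node:
--             return 1  # leaf
--         return sum(_count(child) for child in node.values())
--
--     def _render(node, prefix="", is_last_list=None):
--         """Recursively render the tree with box-drawing characters."""
--         if is_last_list is None:
--             is_last_list = []
--         lines = []
--         items = sorted(node.items())
--         for i, (name, children) in enumerate(items):
--             is_last = i == len(items) - 1
--             count = _count(children)
--
--             # Build the branch prefix
--             if not is_last_list:
--                 connector = "├── " if not is_last else "└── "
--             else:
--                 connector = "├── " if not is_last else "└── "
--
--             line_prefix = ""
--             for prev_last in is_last_list:
--                 line_prefix += "    " if prev_last else "│   "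
--
--             lines.append(f"{line_prefix}{connector}{name} ({count})")
--
--             if children:
--                 lines.extend(
--                     _render(children, prefix, is_last_list + [is_last])
--                 )
--         return lines
--
--     lines = [f"Search Results: {len(metadata_list)} images", ""]
--     lines.extend(_render(root))
--     return "\n".join(lines)
-- ===== SOURCE B (Python) =====
-- def _generate_tree_summary(metadata_list):
--     if not metadata_list:
--         return "No results to summarize."
--
--     RANKS = ("kingdom", "phylum", "class", "order", "family", "genus", "species")
--
--     # distinct taxonomic paths, lexicographically sorted; no tree is ever built
--     paths = sorted({tuple((m.get(r) or "Unknown") for r in RANKS) for m in metadata_list})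
--
--     def _render(paths, prefix):
--         """Group the sorted paths by their first component and recurse on tails."""
--         out = []
--         while paths:
--             name = paths[0][0]
--             k = 0
--             while k < len(paths) and paths[k][0] == name:
--                 k += 1
--             group, paths = paths[:k], paths[k:]
--             is_last = not paths
--             connector = "└── " if is_last else "├── "
--             out.append(f"{prefix}{connector}{name} ({len(group)})")
--             tails = [p[1:] for p in group]
--             if tails and tails[0]:
--                 out.extend(_render(tails, prefix + ("    " if is_last else "│   ")))
--         return out
--
--     lines = [f"Search Results: {len(metadata_list)} images", ""]
--     lines.extend(_render(paths, ""))
--     return "\n".join(lines)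
-- ===== Notes on version B (the rewrite author's own statement) =====
-- stated objective: simpler
-- what changed: A builds a nested defaultdict tree and re-counts every subtree with a recursive _count during rendering; B never builds a tree: it sorts the distinct 7-tuples of rank names once and renders by grouping the sorted paths on their first component and recursing on the tails, the group size being the count.
import Mathlib
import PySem

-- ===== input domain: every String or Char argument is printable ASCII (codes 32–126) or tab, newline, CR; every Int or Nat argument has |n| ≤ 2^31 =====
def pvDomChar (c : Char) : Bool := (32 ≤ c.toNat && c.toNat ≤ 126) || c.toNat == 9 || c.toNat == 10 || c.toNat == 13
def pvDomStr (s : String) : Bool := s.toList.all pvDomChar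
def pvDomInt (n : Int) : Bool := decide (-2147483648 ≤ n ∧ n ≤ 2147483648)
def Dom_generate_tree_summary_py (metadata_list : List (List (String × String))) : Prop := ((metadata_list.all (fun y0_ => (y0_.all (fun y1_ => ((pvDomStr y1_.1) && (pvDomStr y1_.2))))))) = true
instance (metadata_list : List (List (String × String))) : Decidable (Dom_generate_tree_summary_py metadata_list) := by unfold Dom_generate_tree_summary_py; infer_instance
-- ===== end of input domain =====

-- B replaces A's nested-defaultdict tree (+ recursive re-counting) by sorting the distinct
-- 7-tuples of rank names once and rendering by group-and-recurse on that sorted list (simpler: no tree, no _count).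

-- Shared by both ports: Python's `m.get(r) or "Unknown"` (both sources contain this expression).
def pvRankKey (m : List (String × String)) (r : String) : String :=
  match (PySem.Dict.mk m).get? r with
  | none => "Unknown"
  | some v => if v == "" then "Unknown" else v

def pvRanks : List String := ["kingdom", "phylum", "class", "order", "family", "genus", "species"]

-- ===== PORT A =====
-- A's nested defaultdict tree, indexed by remaining depth (depth-7 leaves are empty dicts = Unit).
def TrA : Nat → Type
  | 0 => Unit
  | n + 1 => PySem.Dict String (TrA n)

def TrA.empty : (n : Nat) → TrA n
  | 0 => ()
  | _ + 1 => PySem.Dict.empty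

-- the walk `for r in RANKS: node = node[m.get(r) or "Unknown"]` (defaultdict child access = Dict.modify)
def pvAddPath : (n : Nat) → TrA n → List String → TrA n
  | 0, t, _ => t
  | _ + 1, t, [] => t
  | n + 1, t, k :: ks => PySem.Dict.modify t k (TrA.empty n) (fun c => pvAddPath n c ks)

-- A's `_count`
def pvCount : (n : Nat) → TrA n → Int
  | 0, _ => 1
  | n + 1, t => if t.size = 0 then 1 else ((PySem.Dict.values t).map (pvCount n)).sum

-- Python truthiness of a node (`if children:`)
def pvTruthy : (n : Nat) → TrA n → Bool
  | 0, _ => false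
  | _ + 1, t => decide (t.size ≠ 0)

-- A's `_render`: the enumerate loop is the structural recursion pvRenderItemsA (is_last = rest = [])
mutual
def pvRenderA : (n : Nat) → TrA n → List Bool → List String
  | 0, _, _ => []
  | n + 1, t, bl => pvRenderItemsA n (PySem.List.sorted t.items (fun p => p.1)) bl
  termination_by n _ _ => (n, 0, 0)
def pvRenderItemsA : (n : Nat) → List (String × TrA n) → List Bool → List String
  | _, [], _ => []
  | n, (name, c) :: rest, bl =>
    let isLast : Bool := rest.isEmpty
    let linePrefix : String := bl.foldl (fun s b => s ++ (if b then "    " else "│   ")) ""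
    let connector : String := if isLast then "└── " else "├── "
    (linePrefix ++ connector ++ name ++ " (" ++ PySem.Int.toStr (pvCount n c) ++ ")") ::
      ((if pvTruthy n c then pvRenderA n c (bl ++ [isLast]) else []) ++ pvRenderItemsA n rest bl)
  termination_by n items _ => (n, 1, items.length)
end

def generate_tree_summary_py (metadata_list : List (List (String × String))) : String :=
  if metadata_list.isEmpty then "No results to summarize." else
    let root : TrA 7 :=
      metadata_list.foldl (fun t m => pvAddPath 7 t (pvRanks.map (fun r => pvRankKey m r))) (TrA.empty 7)
    let lines : List String :=
      ["Search Results: " ++ PySem.Int.toStr (metadata_list.length : Int) ++ " images", ""] ++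
        pvRenderA 7 root []
    PySem.Str.join "\n" lines

-- ===== PORT B =====
-- termination helpers for pvRenderB (cited in its decreasing_by)
theorem pv_sum_tails_le (l : List (List String)) :
    (((l.map (fun q => q.tail)).map (fun q => q.length + 1)).sum : Nat) ≤
      (l.map (fun q => q.length + 1)).sum := by
  induction l with
  | nil => simp
  | cons a l ih =>
    simp only [List.map_cons, List.sum_cons]
    have : a.tail.length ≤ a.length := by simp [List.length_tail]
    omega

theorem pv_sum_takeWhile_le (P : List String → Bool) (l : List (List String)) :
    (((l.takeWhile P).map (fun q => q.length + 1)).sum : Nat) ≤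
      (l.map (fun q => q.length + 1)).sum := by
  induction l with
  | nil => simp
  | cons a l ih =>
    by_cases h : P a
    · simpa [List.takeWhile_cons, h] using ih
    · simp [List.takeWhile_cons, h]

theorem pv_sum_dropWhile_le (P : List String → Bool) (l : List (List String)) :
    (((l.dropWhile P).map (fun q => q.length + 1)).sum : Nat) ≤
      (l.map (fun q => q.length + 1)).sum := by
  induction l with
  | nil => simp
  | cons a l ih =>
    by_cases h : P a
    · simp only [List.dropWhile_cons, h, if_true]
      calc ((l.dropWhile P).map (fun q => q.length + 1)).sum ≤ _ := ih
        _ ≤ _ := by simp only [List.map_cons, List.sum_cons]; omega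
    · simp [List.dropWhile_cons, h]

-- Source B's `_render`: group the sorted paths by head, emit one line per group, recurse on the tails.
def pvRenderB : List (List String) → String → List String
  | [], _ => []
  | p :: rest, pre =>
    let name : String := p.headD ""
    let group : List (List String) := (p :: rest).takeWhile (fun q => q.headD "" == name)
    let rest' : List (List String) := (p :: rest).dropWhile (fun q => q.headD "" == name)
    let isLast : Bool := rest'.isEmpty
    let line : String :=
      pre ++ (if isLast then "└── " else "├── ") ++ name ++ " (" ++
        PySem.Int.toStr (group.length : Int) ++ ")"
    let tails : List (List String) := group.map (fun q => q.tail)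
    line ::
      ((if (tails.headD []).isEmpty then []
        else pvRenderB tails (pre ++ (if isLast then "    " else "│   "))) ++
       pvRenderB rest' pre)
termination_by paths _ => (paths.map (fun q => q.length + 1)).sum
decreasing_by
  · -- the tails call: the head path strictly shortens, the rest never grows
    rename_i hne
    have hgr : List.takeWhile (fun q => q.headD "" == p.headD "") (p :: rest) =
        p :: rest.takeWhile (fun q => q.headD "" == p.headD "") := by
      simp [List.takeWhile_cons]
    simp only [tails, group, name, hgr] at hne ⊢
    simp only [List.map_cons, List.sum_cons, List.headD_cons] at hne ⊢
    have hpt : p.tail ≠ [] := by simpa using hne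
    have hp2 : 2 ≤ p.length := by
      cases p with
      | nil => simp at hpt
      | cons a as => cases as with
        | nil => simp at hpt
        | cons b bs => simp
    have h1 := pv_sum_tails_le (rest.takeWhile (fun q => q.headD "" == p.headD ""))
    have h2 := pv_sum_takeWhile_le (fun q => q.headD "" == p.headD "") rest
    have h3 : p.tail.length + 1 ≤ p.length := by
      have : p.tail.length = p.length - 1 := by simp [List.length_tail]
      omega
    omega
  · -- the rest' call: a suffix of the input missing its (matching) head
    have hdr : List.dropWhile (fun q => q.headD "" == p.headD "") (p :: rest) =
        rest.dropWhile (fun q => q.headD "" == p.headD "") := by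
      simp [List.dropWhile_cons]
    simp only [rest', name, hdr]
    have := pv_sum_dropWhile_le (fun q => q.headD "" == p.headD "") rest
    simp only [List.map_cons, List.sum_cons]
    omega

def generate_tree_summary_py_alt (metadata_list : List (List (String × String))) : String :=
  if metadata_list.isEmpty then "No results to summarize." else
    let paths : List (List String) :=
      PySem.List.sorted
        (PySem.Set.ofList (metadata_list.map (fun m => pvRanks.map (fun r => pvRankKey m r))))
        (fun x => x)
    let lines : List String :=
      ["Search Results: " ++ PySem.Int.toStr (metadata_list.length : Int) ++ " images", ""] ++
        pvRenderB paths ""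
    PySem.Str.join "\n" lines

-- ===== PRECONDITION & SPEC =====
def Spec_generate_tree_summary_py (metadata_list : List (List (String × String))) (out : String) : Prop := out = generate_tree_summary_py_alt metadata_list
instance (metadata_list : List (List (String × String))) (out : String) : Decidable (Spec_generate_tree_summary_py metadata_list out) := by unfold Spec_generate_tree_summary_py; infer_instance

-- ===== CLAIM (what is proved, stated in full; the proofs are below) =====
def Claim_equal_generate_tree_summary_py : Prop := ∀ (metadata_list : List (List (String × String))), Dom_generate_tree_summary_py metadata_list → Spec_generate_tree_summary_py metadata_list (generate_tree_summary_py metadata_list)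

-- ===== LEMMAS AND PROOFS =====

-- the sorted distinct rank paths stored in a tree, read off recursively
def pvToPaths : (n : Nat) → TrA n → List (List String)
  | 0, _ => [[]]
  | n + 1, t =>
    (PySem.List.sorted t.items (fun p => p.1)).flatMap
      (fun p => (pvToPaths n p.2).map (p.1 :: ·))

-- well-formedness of trees A actually builds: unique keys, nonempty internal children
def pvWF : (n : Nat) → TrA n → Prop
  | 0, _ => True
  | n + 1, t => (PySem.Dict.keys t).Nodup ∧
      ∀ p ∈ t.items, (pvTruthy n p.2 = true ∨ n = 0) ∧ pvWF n p.2

theorem pv_len_toPaths : ∀ (n : Nat) (t : TrA n), ∀ l ∈ pvToPaths n t, l.length = n := by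
  intro n
  induction n with
  | zero => intro t l hl; simp [pvToPaths] at hl; simp [hl]
  | succ m ih =>
    intro t l hl
    simp only [pvToPaths, List.mem_flatMap, List.mem_map] at hl
    obtain ⟨p, _, l', hl', rfl⟩ := hl
    simp [ih _ _ hl']

theorem pv_toPaths_ne : ∀ (n : Nat) (t : TrA n), pvWF n t → (pvTruthy n t = true ∨ n = 0) →
    pvToPaths n t ≠ [] := by
  intro n
  induction n with
  | zero => intro t _ _; simp [pvToPaths]
  | succ m ih =>
    intro t hwf htr hnil
    have htr' : t.items ≠ [] := by
      rcases htr with h | h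
      · simp only [pvTruthy, decide_eq_true_eq, PySem.Dict.size] at h
        intro h0; exact h (by simp [h0])
      · exact absurd h (by omega)
    obtain ⟨p, hp⟩ : ∃ p, p ∈ PySem.List.sorted t.items (fun q => q.1) := by
      rcases hq : PySem.List.sorted t.items (fun q => q.1) with _ | ⟨p, rest⟩
      · exact absurd ((PySem.List.sorted_eq_nil_iff _ _ _).mp hq) htr'
      · exact ⟨p, by simp [hq]⟩
    have hpmem : p ∈ t.items := (PySem.List.mem_sorted _ _ _ _).mp hp
    have hchild := hwf.2 p hpmem
    have hne := ih p.2 hchild.2 hchild.1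
    simp only [pvToPaths, List.flatMap_eq_nil_iff] at hnil
    have := hnil p hp
    simp only [List.map_eq_nil_iff] at this
    exact hne this

theorem pv_sorted_items_pairwise {ν : Type} (l : List (String × ν))
    (h : (l.map Prod.fst).Nodup) :
    (PySem.List.sorted l (fun p => p.1)).Pairwise (fun a b => a.1 < b.1) := by
  have hle := PySem.List.sorted_pairwise l (fun p => p.1)
  have hperm : (PySem.List.sorted l (fun p => p.1)).Perm l := PySem.List.sorted_perm l _ _
  have hnd : ((PySem.List.sorted l (fun p => p.1)).map Prod.fst).Nodup :=
    ((hperm.map Prod.fst).nodup_iff).mpr h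
  have hne : (PySem.List.sorted l (fun p => p.1)).Pairwise (fun a b => a.1 ≠ b.1) :=
    List.pairwise_map.mp hnd
  exact (hle.and hne).imp (fun hab => lt_of_le_of_ne hab.1 hab.2)

theorem pv_sum_counts {m : Nat} :
    ∀ (l : List (String × TrA m)), (∀ p ∈ l, pvWF m p.2 ∧ (pvTruthy m p.2 = true ∨ m = 0)) →
    (∀ (t : TrA m), pvWF m t → (pvTruthy m t = true ∨ m = 0) →
      pvCount m t = ((pvToPaths m t).length : Int)) →
    ((l.map (fun p => p.2)).map (pvCount m)).sum =
      ((l.map (fun p => ((pvToPaths m p.2).length : Int))).sum) := by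
  intro l hl ih
  induction l with
  | nil => simp
  | cons a l ihl =>
    simp only [List.map_cons, List.sum_cons]
    have ha := hl a (by simp)
    rw [ih a.2 ha.1 ha.2, ihl (fun p hp => hl p (by simp [hp]))]

theorem pv_count_eq : ∀ (n : Nat) (t : TrA n), pvWF n t → (pvTruthy n t = true ∨ n = 0) →
    pvCount n t = ((pvToPaths n t).length : Int) := by
  intro n
  induction n with
  | zero => intro t _ _; simp [pvCount, pvToPaths]
  | succ m ih =>
    intro t hwf htr
    have htr' : t.items ≠ [] := by
      rcases htr with h | h
      · simp only [pvTruthy, decide_eq_true_eq, PySem.Dict.size] at h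
        intro h0; exact h (by simp [h0])
      · exact absurd h (by omega)
    have hsz : ¬ t.size = 0 := by simp [PySem.Dict.size, htr']
    simp only [pvCount, hsz, if_false]
    -- RHS: length of the flatMap over the sorted items
    have hlen : ((pvToPaths (m + 1) t).length : Int) =
        ((PySem.List.sorted t.items (fun p => p.1)).map
          (fun p => ((pvToPaths m p.2).length : Int))).sum := by
      simp only [pvToPaths, List.length_flatMap]
      rw [Nat.cast_list_sum]
      congr 1
      simp [List.map_map, Function.comp]
    rw [hlen]
    have hperm : (PySem.List.sorted t.items (fun p => p.1)).Perm t.items :=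
      PySem.List.sorted_perm _ _ _
    rw [List.Perm.sum_eq (hperm.map _)]
    have := pv_sum_counts t.items
      (fun p hp => ⟨(hwf.2 p hp).2, (hwf.2 p hp).1⟩) (fun t' h1 h2 => ih t' h1 h2)
    simpa [PySem.Dict.values] using this

theorem pv_pairwise_toPaths : ∀ (n : Nat) (t : TrA n), pvWF n t →
    (pvToPaths n t).Pairwise (· < ·) := by
  intro n
  induction n with
  | zero => intro t _; simp [pvToPaths]
  | succ m ih =>
    intro t hwf
    simp only [pvToPaths, List.flatMap_def]
    rw [List.pairwise_flatten]
    have hkeys : (t.items.map Prod.fst).Nodup := by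
      have := hwf.1; simpa [PySem.Dict.keys] using this
    have hsp := pv_sorted_items_pairwise t.items hkeys
    constructor
    · intro l hl
      simp only [List.mem_map] at hl
      obtain ⟨p, hp, rfl⟩ := hl
      have hm : p ∈ t.items := (PySem.List.mem_sorted _ _ _ _).mp hp
      have hin := ih p.2 (hwf.2 p hm).2
      exact List.pairwise_map.mpr (hin.imp (fun h => List.cons_lt_cons_iff.mpr (Or.inr ⟨rfl, h⟩)))
    · rw [List.pairwise_map]
      refine hsp.imp_of_mem ?_
      intro a b _ _ hab
      intro x hx y hy
      simp only [List.mem_map] at hx hy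
      obtain ⟨x', _, rfl⟩ := hx
      obtain ⟨y', _, rfl⟩ := hy
      exact List.cons_lt_cons_iff.mpr (Or.inl hab)

theorem pvWF_empty : ∀ (n : Nat), pvWF n (TrA.empty n) := by
  intro n
  cases n with
  | zero => trivial
  | succ m => exact ⟨by simp [TrA.empty, PySem.Dict.empty, PySem.Dict.keys], by
      intro p hp; simp [TrA.empty, PySem.Dict.empty] at hp⟩

theorem pv_truthy_add : ∀ (n : Nat) (t : TrA n) (ks : List String), ks.length = n → n ≠ 0 →
    pvTruthy n (pvAddPath n t ks) = true := by
  intro n t ks hlen hn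
  cases n with
  | zero => exact absurd rfl hn
  | succ m =>
    cases ks with
    | nil => simp at hlen
    | cons k ks' =>
      simp only [pvAddPath, PySem.Dict.modify, pvTruthy, decide_eq_true_eq, PySem.Dict.size]
      by_cases hc : t.contains k = true
      · rw [PySem.Dict.items_insert_of_contains _ _ hc]
        intro h0
        simp only [List.length_map] at h0
        have : t.items = [] := by
          cases hitems : t.items with
          | nil => rfl
          | cons a l => rw [hitems] at h0; simp at h0
        rw [PySem.Dict.contains_eq_isSome_get?] at hc
        have : t.get? k = none := by
          cases t with
          | mk items => cases this; rfl
        simp [this] at hc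
      · rw [PySem.Dict.items_insert_of_not_contains _ _ (by simpa using hc)]
        simp

theorem pv_mem_toPaths_succ (m : Nat) (d : PySem.Dict String (TrA m)) (l : List String) :
    l ∈ pvToPaths (m + 1) d ↔
      ∃ p ∈ d.items, ∃ l', l' ∈ pvToPaths m p.2 ∧ l = p.1 :: l' := by
  simp only [pvToPaths, List.mem_flatMap, List.mem_map, PySem.List.mem_sorted]
  constructor
  · rintro ⟨p, hp, l', hl', rfl⟩; exact ⟨p, hp, l', hl', rfl⟩
  · rintro ⟨p, hp, l', hl', rfl⟩; exact ⟨p, hp, l', hl', rfl⟩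

theorem pv_toPaths_empty_succ (m : Nat) : pvToPaths (m + 1) (TrA.empty (m + 1)) = [] := by
  have : (TrA.empty (m + 1) : PySem.Dict String (TrA m)).items = [] := rfl
  simp [pvToPaths, this]

theorem pv_add : ∀ (n : Nat) (ks : List String) (t : TrA n), pvWF n t → ks.length = n →
    pvWF n (pvAddPath n t ks) ∧
      (∀ l, l ∈ pvToPaths n (pvAddPath n t ks) ↔ l ∈ pvToPaths n t ∨ l = ks) := by
  intro n
  induction n with
  | zero =>
    intro ks t _ hlen
    rw [List.length_eq_zero_iff] at hlen; subst hlen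
    refine ⟨trivial, ?_⟩
    intro l
    simp [pvToPaths]
  | succ m ih =>
    intro ks t hwf hlen
    cases ks with
    | nil => simp at hlen
    | cons k ks' =>
      have hlen' : ks'.length = m := by simpa using hlen
      obtain ⟨hnd, hch⟩ := hwf
      have hndf : (t.items.map Prod.fst).Nodup := by simpa [PySem.Dict.keys] using hnd
      set c0 : TrA m := t.getD k (TrA.empty m) with hc0
      have hwfc0 : pvWF m c0 := by
        by_cases hc : t.contains k = true
        · rw [PySem.Dict.contains_eq_isSome_get?] at hc
          obtain ⟨v, hv⟩ := Option.isSome_iff_exists.mp hc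
          rw [hc0, PySem.Dict.getD_of_get?_eq_some _ _ hv]
          exact (hch (k, v) (PySem.Dict.mem_items_of_get?_eq_some _ hv)).2
        · rw [hc0, PySem.Dict.getD_of_not_contains _ _ (by simpa using hc)]
          exact pvWF_empty m
      obtain ⟨ihwf, ihmem⟩ := ih ks' c0 hwfc0 hlen'
      set c1 : TrA m := pvAddPath m c0 ks' with hc1
      have haddeq : (pvAddPath (m + 1) t (k :: ks') : PySem.Dict String (TrA m)) =
          t.insert k c1 := by
        simp only [pvAddPath, PySem.Dict.modify, hc1, hc0]
      constructor
      · -- well-formedness is preserved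
        constructor
        · -- keys stay nodup
          rw [haddeq]
          by_cases hc : t.contains k = true
          · have : (t.insert k c1).items =
                t.items.map (fun p => if p.1 == k then (k, c1) else p) :=
              PySem.Dict.items_insert_of_contains _ _ hc
            have hkeys : ((t.insert k c1).items.map Prod.fst) = t.items.map Prod.fst := by
              rw [this, List.map_map]
              refine List.map_congr_left ?_
              intro p _
              by_cases hpk : p.1 == k
              · simp only [Function.comp, hpk, if_true]
                simpa using (eq_of_beq hpk).symm
              · simp [Function.comp, hpk]
            simpa [PySem.Dict.keys, hkeys] using hndf
          · have hcf : t.contains k = false := by simpa using hc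
            have hit : (t.insert k c1).items = t.items ++ [(k, c1)] :=
              PySem.Dict.items_insert_of_not_contains _ _ hcf
            have hk : k ∉ t.items.map Prod.fst := by
              intro hmem
              have : t.contains k = true := (PySem.Dict.contains_iff_mem_keys t k).mpr
                (by simpa [PySem.Dict.keys] using hmem)
              rw [hcf] at this; exact absurd this (by simp)
            simp only [PySem.Dict.keys, hit, List.map_append, List.map_cons, List.map_nil]
            exact hndf.append (List.nodup_singleton k)
              (fun a ha hb => by
                simp only [List.mem_singleton] at hb; subst hb; exact hk ha)
        · -- every child is wf and truthy
          intro p hp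
          rw [haddeq] at hp
          rcases (PySem.Dict.mem_items_insert t k c1 p).mp hp with hpc | ⟨hpm, _⟩
          · subst hpc
            refine ⟨?_, ihwf⟩
            cases m with
            | zero => exact Or.inr rfl
            | succ m' => exact Or.inl (pv_truthy_add _ _ _ hlen' (by omega))
          · exact hch p hpm
      · -- membership in the path set
        intro l
        rw [haddeq, pv_mem_toPaths_succ, pv_mem_toPaths_succ]
        constructor
        · rintro ⟨p, hp, l', hl', rfl⟩
          rcases (PySem.Dict.mem_items_insert t k c1 p).mp hp with hpc | ⟨hpm, _⟩
          · subst hpc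
            rcases (ihmem l').mp hl' with hin | rfl
            · -- l' came from the old child
              by_cases hc : t.contains k = true
              · rw [PySem.Dict.contains_eq_isSome_get?] at hc
                obtain ⟨v, hv⟩ := Option.isSome_iff_exists.mp hc
                have hveq : c0 = v := by rw [hc0, PySem.Dict.getD_of_get?_eq_some _ _ hv]
                exact Or.inl ⟨(k, v), PySem.Dict.mem_items_of_get?_eq_some _ hv, l',
                  by rw [← hveq]; exact ⟨hin, rfl⟩⟩
              · have hc0e : c0 = TrA.empty m := by
                  rw [hc0, PySem.Dict.getD_of_not_contains _ _ (by simpa using hc)]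
                cases m with
                | zero =>
                  have : ks' = [] := by simpa using hlen'
                  subst this
                  have : l' = [] := by
                    rw [hc0e] at hin; simpa [pvToPaths] using hin
                  subst this
                  exact Or.inr rfl
                | succ m' =>
                  rw [hc0e, pv_toPaths_empty_succ] at hin
                  simp at hin
            · exact Or.inr rfl
          · exact Or.inl ⟨p, hpm, l', hl', rfl⟩
        · rintro (⟨p, hp, l', hl', rfl⟩ | rfl)
          · by_cases hpk : p.1 = k
            · have hp2 : p.2 = c0 := by
                have : t.getD p.1 (TrA.empty m) = p.2 :=
                  PySem.Dict.getD_of_mem_items (d := t) (k := p.1) (v := p.2)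
                    (by exact hp) hnd (TrA.empty m)
                rw [hc0, ← hpk, this]
              refine ⟨(k, c1), (PySem.Dict.mem_items_insert t k c1 _).mpr (Or.inl rfl), l', ?_, by rw [hpk]⟩
              exact (ihmem l').mpr (Or.inl (by rwa [← hp2]))
            · exact ⟨p, (PySem.Dict.mem_items_insert t k c1 p).mpr (Or.inr ⟨hp, hpk⟩), l', hl', rfl⟩
          · exact ⟨(k, c1), (PySem.Dict.mem_items_insert t k c1 _).mpr (Or.inl rfl), ks',
              (ihmem ks').mpr (Or.inr rfl), rfl⟩

theorem pv_tw {α : Type} (P : α → Bool) : ∀ (xs ys : List α),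
    (∀ x ∈ xs, P x = true) → (∀ y ∈ ys, P y = false) →
    (xs ++ ys).takeWhile P = xs ∧ (xs ++ ys).dropWhile P = ys := by
  intro xs ys h1 h2
  induction xs with
  | nil =>
    simp only [List.nil_append]
    cases ys with
    | nil => simp
    | cons y ys => simp [List.takeWhile_cons, List.dropWhile_cons, h2 y (by simp)]
  | cons x xs ih =>
    have hx := h1 x (by simp)
    have := ih (fun x hx => h1 x (by simp [hx]))
    simp [hx, this.1, this.2]

-- one step of pvRenderB on a first group followed by the remaining paths
theorem pv_renderB_cons (k : String) (l0 : List String) (tp0 RF : List (List String))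
    (pre : String)
    (h2 : ∀ q ∈ RF, (q.headD "" == k) = false) :
    pvRenderB (((k :: l0) :: tp0.map (k :: ·)) ++ RF) pre =
      (pre ++ (if RF.isEmpty then "└── " else "├── ") ++ k ++ " (" ++
          PySem.Int.toStr (((l0 :: tp0).length : Nat) : Int) ++ ")") ::
        ((if ((l0 :: tp0).headD []).isEmpty then []
          else pvRenderB (l0 :: tp0) (pre ++ (if RF.isEmpty then "    " else "│   "))) ++
         pvRenderB RF pre) := by
  have h1 : ∀ q ∈ (k :: l0) :: tp0.map (k :: ·), (fun q => q.headD "" == k) q = true := by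
    intro q hq
    rcases List.mem_cons.mp hq with rfl | hq
    · simp
    · obtain ⟨q', _, rfl⟩ := List.mem_map.mp hq
      simp
  have htw := pv_tw (fun q => q.headD "" == k) ((k :: l0) :: tp0.map (k :: ·)) RF h1 h2
  have htw1 : ((k :: l0) :: (tp0.map (k :: ·) ++ RF)).takeWhile (fun q => q.headD "" == k) =
      (k :: l0) :: tp0.map (k :: ·) := by rw [← List.cons_append]; exact htw.1
  have htw2 : ((k :: l0) :: (tp0.map (k :: ·) ++ RF)).dropWhile (fun q => q.headD "" == k) =
      RF := by rw [← List.cons_append]; exact htw.2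
  have htails : ((k :: l0) :: tp0.map (k :: ·)).map (fun q => q.tail) = l0 :: tp0 := by
    simp only [List.map_cons, List.map_map, List.tail_cons]
    congr 1
    have hfun : ((fun q : List String => q.tail) ∘ fun x => k :: x) = fun q => q := rfl
    rw [hfun, List.map_id']
  conv_lhs => rw [List.cons_append]
  conv_lhs => simp only [pvRenderB, List.headD_cons]
  simp only [htw1, htw2, htails]
  simp only [List.headD_cons, List.length_cons, List.length_map]

theorem pv_renderItems_gen (n : Nat)
    (hrec : ∀ (c : TrA n) (bl' : List Bool), (pvTruthy n c = true ∨ n = 0) → pvWF n c →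
      (if pvTruthy n c then pvRenderA n c bl' else []) =
        (if ((pvToPaths n c).headD []).isEmpty then []
         else pvRenderB (pvToPaths n c)
           (bl'.foldl (fun s b => s ++ (if b then "    " else "│   ")) ""))) :
    ∀ (items : List (String × TrA n)) (bl : List Bool),
    items.Pairwise (fun a b => a.1 < b.1) →
    (∀ p ∈ items, (pvTruthy n p.2 = true ∨ n = 0) ∧ pvWF n p.2) →
    pvRenderItemsA n items bl =
      pvRenderB (items.flatMap (fun p => (pvToPaths n p.2).map (p.1 :: ·)))
        (bl.foldl (fun s b => s ++ (if b then "    " else "│   ")) "") := by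
  intro items
  induction items with
  | nil => intro bl _ _; simp only [pvRenderItemsA, List.flatMap_nil, pvRenderB]
  | cons hd rest ihit =>
    obtain ⟨k, c⟩ := hd
    intro bl hpw hyp
    have hhd := hyp (k, c) (by simp)
    obtain ⟨l0, tp0, htp⟩ : ∃ l0 tp0, pvToPaths n c = l0 :: tp0 := by
      cases h : pvToPaths n c with
      | nil => exact absurd h (pv_toPaths_ne n c hhd.2 hhd.1)
      | cons a b => exact ⟨a, b, rfl⟩
    have hpw' := List.pairwise_cons.mp hpw
    have h2 : ∀ q ∈ rest.flatMap (fun p => (pvToPaths n p.2).map (p.1 :: ·)),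
        (q.headD "" == k) = false := by
      intro q hq
      obtain ⟨p, hp, hq⟩ := List.mem_flatMap.mp hq
      obtain ⟨q', _, rfl⟩ := List.mem_map.mp hq
      have : k < p.1 := hpw'.1 p hp
      simp [ne_of_gt this]
    have hflat : ((k, c) :: rest).flatMap (fun p => (pvToPaths n p.2).map (p.1 :: ·)) =
        ((k :: l0) :: tp0.map (k :: ·)) ++
          rest.flatMap (fun p => (pvToPaths n p.2).map (p.1 :: ·)) := by
      simp [htp]
    have hLast : (rest.flatMap (fun p => (pvToPaths n p.2).map (p.1 :: ·))).isEmpty =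
        rest.isEmpty := by
      cases rest with
      | nil => simp
      | cons p' r' =>
        have hne := pv_toPaths_ne n p'.2 (hyp p' (by simp)).2 (hyp p' (by simp)).1
        cases h' : pvToPaths n p'.2 with
        | nil => exact absurd h' hne
        | cons a b => simp [h']
    have hcount : pvCount n c = (((l0 :: tp0).length : Nat) : Int) := by
      rw [pv_count_eq n c hhd.2 hhd.1, htp]
    rw [hflat, pv_renderB_cons k l0 tp0 _ _ h2]
    simp only [pvRenderItemsA]
    rw [hcount, hLast]
    congr 1
    congr 1
    · -- the recursive descent into the child
      have h := hrec c (bl ++ [rest.isEmpty]) hhd.1 hhd.2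
      rw [htp] at h
      rw [h]
      simp [List.foldl_append]
    · -- the remaining siblings
      exact ihit bl (List.Pairwise.sublist (by simp) hpw) (fun p hp => hyp p (by simp [hp]))

theorem pv_renderItems : ∀ (n : Nat) (items : List (String × TrA n)) (bl : List Bool),
    items.Pairwise (fun a b => a.1 < b.1) →
    (∀ p ∈ items, (pvTruthy n p.2 = true ∨ n = 0) ∧ pvWF n p.2) →
    pvRenderItemsA n items bl =
      pvRenderB (items.flatMap (fun p => (pvToPaths n p.2).map (p.1 :: ·)))
        (bl.foldl (fun s b => s ++ (if b then "    " else "│   ")) "") := by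
  intro n
  induction n with
  | zero =>
    refine pv_renderItems_gen 0 ?_
    intro c bl' _ _
    simp [pvTruthy, pvToPaths]
  | succ m ihn =>
    refine pv_renderItems_gen (m + 1) ?_
    intro c bl' htr hwf
    have htt : pvTruthy (m + 1) c = true := by
      rcases htr with h | h
      · exact h
      · exact absurd h (by omega)
    obtain ⟨l0, tp0, htp⟩ : ∃ l0 tp0, pvToPaths (m + 1) c = l0 :: tp0 := by
      cases h : pvToPaths (m + 1) c with
      | nil => exact absurd h (pv_toPaths_ne (m + 1) c hwf (Or.inl htt))
      | cons a b => exact ⟨a, b, rfl⟩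
    have hl0 : l0.length = m + 1 := pv_len_toPaths (m + 1) c l0 (by simp [htp])
    have hl0ne : l0.isEmpty = false := by
      cases l0 with
      | nil => simp at hl0
      | cons a b => simp
    rw [htt, if_pos rfl, htp]
    simp only [List.headD_cons, hl0ne, Bool.false_eq_true, if_false]
    rw [← htp]
    have hnd : (c.items.map Prod.fst).Nodup := by
      simpa [PySem.Dict.keys] using hwf.1
    have := ihn (PySem.List.sorted c.items (fun p => p.1)) bl'
      (pv_sorted_items_pairwise c.items hnd)
      (fun p hp => hwf.2 p ((PySem.List.mem_sorted _ _ _ _).mp hp))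
    simp only [pvRenderA]
    rw [this]
    rfl

theorem pv_build : ∀ (ks : List (List String)) (t : TrA 7),
    pvWF 7 t → (∀ k ∈ ks, k.length = 7) →
    pvWF 7 (ks.foldl (pvAddPath 7) t) ∧
      (∀ l, l ∈ pvToPaths 7 (ks.foldl (pvAddPath 7) t) ↔ l ∈ pvToPaths 7 t ∨ l ∈ ks) := by
  intro ks
  induction ks with
  | nil => intro t hwf _; exact ⟨hwf, fun l => by simp⟩
  | cons k ks ih =>
    intro t hwf hlens
    obtain ⟨hwf', hmem'⟩ := pv_add 7 k t hwf (hlens k (by simp))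
    obtain ⟨hwf'', hmem''⟩ := ih (pvAddPath 7 t k) hwf' (fun k' hk' => hlens k' (by simp [hk']))
    refine ⟨by simpa using hwf'', ?_⟩
    intro l
    rw [List.foldl_cons] at *
    rw [hmem'' l, hmem' l]
    simp only [List.mem_cons]
    tauto


-- ===== VERDICT (by name: the statement is the Claim_ definition above) =====
theorem generate_tree_summary_py_spec : Claim_equal_generate_tree_summary_py := by
  intro ml _dom
  unfold Spec_generate_tree_summary_py
  by_cases hml : ml.isEmpty
  · simp [generate_tree_summary_py, generate_tree_summary_py_alt, hml]
  · simp only [generate_tree_summary_py, generate_tree_summary_py_alt, hml,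
      Bool.false_eq_true, if_false]
    have hkeys_len : ∀ k ∈ ml.map (fun m => pvRanks.map (fun r => pvRankKey m r)), k.length = 7 := by
      intro k hk
      obtain ⟨m, _, rfl⟩ := List.mem_map.mp hk
      simp [pvRanks]
    obtain ⟨hwfR, hmemR⟩ :=
      pv_build (ml.map (fun m => pvRanks.map (fun r => pvRankKey m r))) (TrA.empty 7)
        (pvWF_empty 7) hkeys_len
    have hfold : ml.foldl (fun t m => pvAddPath 7 t (pvRanks.map (fun r => pvRankKey m r)))
        (TrA.empty 7) =
        (ml.map (fun m => pvRanks.map (fun r => pvRankKey m r))).foldl (pvAddPath 7)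
          (TrA.empty 7) := by rw [List.foldl_map]
    set keys := ml.map (fun m => pvRanks.map (fun r => pvRankKey m r)) with hk
    set root := keys.foldl (pvAddPath 7) (TrA.empty 7) with hr
    have hempty : pvToPaths 7 (TrA.empty 7) = [] := pv_toPaths_empty_succ 6
    have hmem : ∀ l, l ∈ pvToPaths 7 root ↔ l ∈ PySem.Set.ofList keys := by
      intro l
      rw [hmemR l, hempty]
      simp [PySem.Set.mem_ofList]
    have hpw : (pvToPaths 7 root).Pairwise (· < ·) := pv_pairwise_toPaths 7 root hwfR
    have hperm : (pvToPaths 7 root).Perm (PySem.Set.ofList keys) :=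
      (List.perm_ext_iff_of_nodup (hpw.imp (fun h => ne_of_lt h)) (PySem.Set.nodup_ofList keys)).mpr hmem
    have hpaths : PySem.List.sorted (PySem.Set.ofList keys) (fun x : List String => x) =
        pvToPaths 7 root := by
      rw [show (fun a b => (a : List String).decidableLT b) =
          (LinearOrder.toDecidableLT : DecidableLT (List String)) from Subsingleton.elim _ _]
      exact PySem.List.sorted_eq_of_perm_of_pairwise_lt _ _ _ hperm hpw
    have hnd : ((root : PySem.Dict String (TrA 6)).items.map Prod.fst).Nodup := by
      simpa [PySem.Dict.keys] using hwfR.1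
    have hrender : pvRenderA 7 root [] = pvRenderB (pvToPaths 7 root) "" := by
      simp only [pvRenderA]
      rw [pv_renderItems 6 _ []
        (pv_sorted_items_pairwise _ hnd)
        (fun p hp => ⟨(hwfR.2 p ((PySem.List.mem_sorted _ _ _ _).mp hp)).1,
          (hwfR.2 p ((PySem.List.mem_sorted _ _ _ _).mp hp)).2⟩)]
      rfl
    rw [hfold, hpaths, hrender]
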